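-- pv_equiv track=rewrite | github.com/provectus/internship | dataeng/optimization.py | count_connections
-- ===== SOURCE A (Python) =====
-- from collections import Counter
--
-- def count_connections(list1: list, list2: list) -> int:
--     counter1 = Counter(list1)
--     counter2 = Counter(list2)
--     l1 = set(list1)
--     intersections = l1.intersection(list2)
--     sum = 0
--     for i in intersections:
--         sum += int(counter1[i]) * int(counter2[i])
--     return sum
-- ===== SOURCE B (Python) =====
-- def count_connections(list1: list, list2: list) -> int:
--     counts = {}
--     for x in list1:
--         counts[x] = counts.get(x, 0) + 1
--     total = 0
--     for x in list2:
--         total += counts.get(x, 0)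
--     return total
-- ===== Notes on version B (the rewrite author's own statement) =====
-- stated objective: simpler
-- what changed: Drops the second Counter, the set and the intersection with its per-distinct-element product sum; B builds one plain hand-written count dict over list1 and accumulates counts.get(x,0) in a single explicit pass over list2, using the identity sum_{x in list2} count1(x) = sum_{shared i} count1(i)*count2(i).
import Mathlib
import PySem

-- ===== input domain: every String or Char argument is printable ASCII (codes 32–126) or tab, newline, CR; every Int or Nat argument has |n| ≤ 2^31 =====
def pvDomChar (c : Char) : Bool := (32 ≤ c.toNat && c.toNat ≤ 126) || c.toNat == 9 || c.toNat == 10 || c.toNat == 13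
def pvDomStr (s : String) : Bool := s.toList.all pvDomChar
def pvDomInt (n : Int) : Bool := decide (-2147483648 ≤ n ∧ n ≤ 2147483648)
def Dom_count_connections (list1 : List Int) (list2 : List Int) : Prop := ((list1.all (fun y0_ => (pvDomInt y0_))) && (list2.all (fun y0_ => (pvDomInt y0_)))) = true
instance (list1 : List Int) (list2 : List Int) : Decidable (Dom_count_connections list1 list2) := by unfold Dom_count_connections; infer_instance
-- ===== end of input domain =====

-- B replaces Counters, set and intersection by one hand-built count dict over list1 and a plain accumulating pass over list2 (simpler).

-- ===== PORT A =====
def count_connections (list1 : List Int) (list2 : List Int) : Int :=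
  let counter1 := PySem.Dict.counter list1
  let counter2 := PySem.Dict.counter list2
  let l1 := PySem.Set.ofList list1
  let intersections := PySem.Set.inter l1 list2
  -- 'for i in intersections: sum += counter1[i] * counter2[i]' (sum over a Python set: order-independent)
  intersections.foldl (fun s i => s + counter1.getD i 0 * counter2.getD i 0) 0

-- ===== PORT B =====
def count_connections_alt (list1 : List Int) (list2 : List Int) : Int :=
  -- 'counts = {}; for x in list1: counts[x] = counts.get(x, 0) + 1'
  let counts : PySem.Dict Int Int :=
    list1.foldl (fun d x => d.insert x (d.getD x 0 + 1)) PySem.Dict.empty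
  -- 'total = 0; for x in list2: total += counts.get(x, 0)'
  list2.foldl (fun total x => total + counts.getD x 0) 0

-- ===== PRECONDITION & SPEC =====
def Spec_count_connections (list1 : List Int) (list2 : List Int) (out : Int) : Prop := out = count_connections_alt list1 list2
instance (list1 : List Int) (list2 : List Int) (out : Int) : Decidable (Spec_count_connections list1 list2 out) := by unfold Spec_count_connections; infer_instance

-- ===== CLAIM (what is proved, stated in full; the proofs are below) =====
def Claim_equal_count_connections : Prop := ∀ (list1 : List Int) (list2 : List Int), Dom_count_connections list1 list2 → Spec_count_connections list1 list2 (count_connections list1 list2)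

-- ===== LEMMAS AND PROOFS =====

-- Sum over a Nodup list of 'f at x, else 0'.
theorem pv_sum_ite (D : List Int) (hD : D.Nodup) (f : Int → Int) (x : Int) :
    (D.map (fun i => if i = x then f i else 0)).sum = if x ∈ D then f x else 0 := by
  induction D with
  | nil => simp
  | cons d t ih =>
    rcases List.nodup_cons.mp hD with ⟨hd, ht⟩
    by_cases h : d = x
    · subst h
      simp [List.map_cons, ih ht, hd]
    · simp [List.map_cons, ih ht, h, Ne.symm h]

-- Grouping identity: a sum of f over l equals the sum over any Nodup list D containing
-- every element of l with nonzero f, weighted by multiplicity in l.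
theorem pv_sum_group (D : List Int) (hD : D.Nodup) (f : Int → Int) :
    ∀ l : List Int, (∀ x ∈ l, f x ≠ 0 → x ∈ D) →
      (l.map f).sum = (D.map (fun i => (l.count i : Int) * f i)).sum := by
  intro l
  induction l with
  | nil => intro _; simp
  | cons x t ih =>
    intro h
    have ht := ih (fun y hy hf => h y (List.mem_cons_of_mem _ hy) hf)
    have hsplit : (D.map (fun i => ((x :: t).count i : Int) * f i)).sum
        = (D.map (fun i => (t.count i : Int) * f i + (if i = x then f i else 0))).sum := by
      congr 1
      apply List.map_congr_left
      intro i _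
      rw [List.count_cons]
      push_cast
      by_cases hix : i = x
      · simp [hix]; ring
      · have hxi : ¬ x = i := fun e => hix e.symm
        simp [hix, hxi]
    rw [hsplit, PySem.List.sum_map_add_int, ← ht, pv_sum_ite D hD f x]
    by_cases hf : f x = 0
    · simp [hf, ht]
    · have hx : x ∈ D := h x (List.mem_cons_self) hf
      simp [hx]
      ring

-- ===== VERDICT (by name: the statement is the Claim_ definition above) =====
theorem count_connections_spec : Claim_equal_count_connections := by
  intro list1 list2 _
  unfold Spec_count_connections count_connections count_connections_alt
  simp only [PySem.List.foldl_add, PySem.Dict.getD_counter, zero_add,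
    PySem.Dict.getD_foldl_insert_add_one, PySem.Dict.getD_empty]
  rw [pv_sum_group (PySem.Set.inter (PySem.Set.ofList list1) list2)
        (PySem.Set.nodup_inter _ _ (PySem.Set.nodup_ofList _))
        (fun x => (list1.count x : Int)) list2]
  · congr 1
    apply List.map_congr_left
    intro i _
    ring
  · intro x hx hf
    have : x ∈ list1 := by
      by_contra hmem
      exact hf (by simp [List.count_eq_zero_of_not_mem hmem])
    rw [PySem.Set.mem_inter]
    exact ⟨(PySem.Set.mem_ofList _ _).mpr this, hx⟩
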